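-- pv_equiv track=rewrite | github.com/danielrjackson/taskautomation | src/taskautomation/run_tests.py | organize_tasks_by_priority
-- ===== SOURCE A (Python) =====
-- def organize_tasks_by_priority(task_blocks: list[str], original_text: str) -> str:
--     """
--     Organize tasks into priority sections and add archive section.
--
--     Parameters
--     ----------
--     task_blocks : list[str]
--         List of formatted task blocks
--     original_text : str
--         Original TASKS.md content
--
--     Returns
--     -------
--     str
--         New organized content with priority sections
--     """
--     lines = original_text.split("\n")
--
--     # Build the new content (removed unused sections variable)
--
--     # Build the new content
--     new_lines = []
--
--     # Find the first dash line (start of tasks section)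
--     first_dash_line = -1
--     for i, line in enumerate(lines):
--         if line.startswith("---") and len(line.strip()) > 10:
--             first_dash_line = i
--             break
--
--     if first_dash_line >= 0:
--         # Add everything up to and including the first dash line
--         new_lines.extend(lines[: first_dash_line + 1])
--     else:
--         # No dash lines found, add basic structure
--         new_lines = lines[:]
--         new_lines.append("")
--         new_lines.append("---" + "-" * 90)
--
--     new_lines.append("")
--
--     # Add priority sections with tasks
--     priority_order = ["Critical", "High", "Medium", "Low"]
--
--     for priority in priority_order:
--         new_lines.append(f"## {priority} Priority Tasks")
--         new_lines.append("")
--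
--         # Add test task blocks if they match this priority
--         for block in task_blocks:
--             if f"- **Priority**: {priority}" in block:
--                 new_lines.extend(block.rstrip().split("\n"))
--                 new_lines.append("")
--
--         # Add existing non-test tasks for this priority (if any exist)
--         # For now, we'll put existing tasks in their original locations
--         # This is a placeholder for future enhancement
--
--         new_lines.append("")
--
--     # Add archive section
--     new_lines.append("## Archive")
--     new_lines.append("")
--     new_lines.append("*Completed tasks are moved here for historical reference.*")
--     new_lines.append("")
--
--     # Find and add the second dash line if it exists
--     second_dash_line = -1
--     for i in range(first_dash_line + 1 if first_dash_line >= 0 else 0, len(lines)):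
--         if lines[i].startswith("---") and len(lines[i].strip()) > 10:
--             second_dash_line = i
--             break
--
--     if second_dash_line >= 0:
--         new_lines.append("---" + "-" * 90)
--         new_lines.extend(lines[second_dash_line + 1 :])
--     else:
--         new_lines.append("---" + "-" * 90)
--
--     return "\n".join(new_lines)
-- ===== SOURCE B (Python) =====
-- _PRIORITIES = ["Critical", "High", "Medium", "Low"]
--
--
-- def organize_tasks_by_priority(task_blocks: list[str], original_text: str) -> str:
--     lines = original_text.split("\n")
--
--     # one pass over the lines: indices of all long dash lines
--     dashes = [i for i, line in enumerate(lines)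
--               if line.startswith("---") and len(line.strip()) > 10]
--
--     # one pass over the blocks: bucket each block under every priority it mentions
--     buckets = {p: [] for p in _PRIORITIES}
--     for block in task_blocks:
--         for p in _PRIORITIES:
--             if f"- **Priority**: {p}" in block:
--                 buckets[p].append(block)
--
--     head = lines[:dashes[0] + 1] if dashes else lines + ["", "-" * 93]
--
--     mid = []
--     for p in _PRIORITIES:
--         mid += [f"## {p} Priority Tasks", ""]
--         for block in buckets[p]:
--             mid += block.rstrip().split("\n") + [""]
--         mid.append("")
--
--     tail = ["-" * 93] + (lines[dashes[1] + 1:] if len(dashes) > 1 else [])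
--
--     return "\n".join(
--         head + [""] + mid
--         + ["## Archive", "", "*Completed tasks are moved here for historical reference.*", ""]
--         + tail)
-- ===== Notes on version B (the rewrite author's own statement) =====
-- stated objective: alternative
-- what changed: B replaces A's two break-out scans for dash lines with one enumerate-filter pass producing a dash-index list, and replaces A's per-priority re-scan of task_blocks with a single grouping pass building a priority->blocks dict that is then emitted bucket by bucket.
import Mathlib
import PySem

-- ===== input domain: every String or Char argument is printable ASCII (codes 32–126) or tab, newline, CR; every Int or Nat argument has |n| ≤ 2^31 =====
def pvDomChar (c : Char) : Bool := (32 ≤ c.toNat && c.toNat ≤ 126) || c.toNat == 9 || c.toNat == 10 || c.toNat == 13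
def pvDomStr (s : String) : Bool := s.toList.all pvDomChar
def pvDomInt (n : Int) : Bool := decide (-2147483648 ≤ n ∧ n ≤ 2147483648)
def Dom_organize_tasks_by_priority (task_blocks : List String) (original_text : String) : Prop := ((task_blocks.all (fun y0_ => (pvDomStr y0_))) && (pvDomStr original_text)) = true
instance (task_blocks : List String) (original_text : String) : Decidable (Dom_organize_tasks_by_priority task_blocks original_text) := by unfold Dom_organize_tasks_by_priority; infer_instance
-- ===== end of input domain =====

-- B rebuilds the document from a one-pass dash-index list and a one-pass priority→blocks bucket dict
-- instead of A's two break-loops and per-priority re-scans of task_blocks (objective: alternative).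

-- ===== PORT A =====

-- line.startswith("---") and len(line.strip()) > 10
def pvIsDashA (line : String) : Bool :=
  PySem.Str.startswith line "---" && decide (10 < PySem.Str.len (PySem.Str.strip line))

-- the `for i, line in enumerate(lines): … break` search for the first dash line
def pvFirstLoopA : List (Int × String) → Int
  | [] => -1
  | (i, line) :: rest => if pvIsDashA line then i else pvFirstLoopA rest

-- the `for i in range(start, len(lines)): … break` search; lines[i] is in range on every
-- iteration (i drawn from range(start, len(lines)) with 0 ≤ start), so pyGetD with a dummy default is exact
def pvSecondLoopA (lines : List String) : List Int → Int
  | [] => -1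
  | i :: rest => if pvIsDashA (PySem.List.pyGetD lines i "") then i else pvSecondLoopA lines rest

-- inner `for block in task_blocks:` loop of one priority section
def pvSectionLoopA (task_blocks : List String) (priority : String) (acc : List String) : List String :=
  task_blocks.foldl (fun acc block =>
    if PySem.Str.isIn ("- **Priority**: " ++ priority) block then
      acc ++ (PySem.Str.split? (PySem.Str.rstrip block) "\n").getD [] ++ [""]
    else acc) acc

def organize_tasks_by_priority (task_blocks : List String) (original_text : String) : String :=
  let lines := (PySem.Str.split? original_text "\n").getD []   -- "\n" ≠ "", so split? returns
  let first_dash_line := pvFirstLoopA (PySem.List.enumerate lines 0)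
  let new_lines :=
    if first_dash_line ≥ 0 then
      PySem.List.slice lines none (some (first_dash_line + 1))
    else
      -- "---" + "-" * 90
      lines ++ ["", "---" ++ String.ofList (List.replicate 90 '-')]
  let new_lines := new_lines ++ [""]
  let new_lines := ["Critical", "High", "Medium", "Low"].foldl
    (fun acc priority =>
      pvSectionLoopA task_blocks priority
        (acc ++ ["## " ++ priority ++ " Priority Tasks", ""]) ++ [""]) new_lines
  let new_lines := new_lines ++
    ["## Archive", "", "*Completed tasks are moved here for historical reference.*", ""]
  let second_dash_line := pvSecondLoopA lines
    (PySem.List.pyRange (if first_dash_line ≥ 0 then first_dash_line + 1 else 0) lines.length 1)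
  let new_lines :=
    if second_dash_line ≥ 0 then
      (new_lines ++ ["---" ++ String.ofList (List.replicate 90 '-')]) ++
        PySem.List.slice lines (some (second_dash_line + 1)) none
    else
      new_lines ++ ["---" ++ String.ofList (List.replicate 90 '-')]
  PySem.Str.join "\n" new_lines

-- ===== PORT B =====

def pvIsDashB (line : String) : Bool :=
  PySem.Str.startswith line "---" && decide (10 < PySem.Str.len (PySem.Str.strip line))

-- [i for i, line in enumerate(lines) if …]
def pvDashIdxs (lines : List String) : List Int :=
  ((PySem.List.enumerate lines 0).filter (fun p => pvIsDashB p.2)).map (fun p => p.1)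

-- buckets = {p: [] for p in _PRIORITIES}; then one pass over task_blocks appending
def pvBuckets (task_blocks : List String) : PySem.Dict String (List String) :=
  task_blocks.foldl
    (fun d block =>
      ["Critical", "High", "Medium", "Low"].foldl
        (fun d p =>
          if PySem.Str.isIn ("- **Priority**: " ++ p) block then
            d.modify p [] (fun l => l ++ [block])
          else d) d)
    (["Critical", "High", "Medium", "Low"].foldl
      (fun d p => d.insert p []) PySem.Dict.empty)

def organize_tasks_by_priority_alt (task_blocks : List String) (original_text : String) : String :=
  let lines := (PySem.Str.split? original_text "\n").getD []
  let dashes := pvDashIdxs lines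
  let buckets := pvBuckets task_blocks
  let head :=
    match dashes with
    | d0 :: _ => PySem.List.slice lines none (some (d0 + 1))
    | [] => lines ++ ["", String.ofList (List.replicate 93 '-')]   -- "-" * 93
  let mid := ["Critical", "High", "Medium", "Low"].foldl
    (fun acc p =>
      ((buckets.getD p []).foldl
        (fun acc block => acc ++ (PySem.Str.split? (PySem.Str.rstrip block) "\n").getD [] ++ [""])
        (acc ++ ["## " ++ p ++ " Priority Tasks", ""])) ++ [""]) []
  let tail :=
    match dashes with
    | _ :: d1 :: _ => [String.ofList (List.replicate 93 '-')] ++ PySem.List.slice lines (some (d1 + 1)) none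
    | _ => [String.ofList (List.replicate 93 '-')]
  PySem.Str.join "\n"
    (head ++ [""] ++ mid ++
      ["## Archive", "", "*Completed tasks are moved here for historical reference.*", ""] ++ tail)

-- ===== PRECONDITION & SPEC =====
def Spec_organize_tasks_by_priority (task_blocks : List String) (original_text : String) (out : String) : Prop := out = organize_tasks_by_priority_alt task_blocks original_text
instance (task_blocks : List String) (original_text : String) (out : String) : Decidable (Spec_organize_tasks_by_priority task_blocks original_text out) := by unfold Spec_organize_tasks_by_priority; infer_instance

-- ===== CLAIM (what is proved, stated in full; the proofs are below) =====
def Claim_equal_organize_tasks_by_priority : Prop := ∀ (task_blocks : List String) (original_text : String), Dom_organize_tasks_by_priority task_blocks original_text → Spec_organize_tasks_by_priority task_blocks original_text (organize_tasks_by_priority task_blocks original_text)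

-- ===== LEMMAS AND PROOFS =====

-- A's per-priority scan of all blocks emits exactly the chunks of the blocks that match the priority
theorem pvSectionLoopA_eq (task_blocks : List String) (p : String) : ∀ (acc : List String),
    pvSectionLoopA task_blocks p acc
      = acc ++ (task_blocks.filter (fun b => PySem.Str.isIn ("- **Priority**: " ++ p) b)).flatMap
          (fun b => (PySem.Str.split? (PySem.Str.rstrip b) "\n").getD [] ++ [""]) := by
  induction task_blocks with
  | nil => intro acc; simp [pvSectionLoopA]
  | cons b bs ih =>
      intro acc
      simp only [pvSectionLoopA, List.foldl_cons] at ih ⊢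
      rw [List.filter_cons]
      split_ifs with h
      · rw [ih]; simp
      · rw [ih]

-- B's emission loop over a bucket is the flatMap of its chunks
theorem pvEmitLoop_eq : ∀ (bl : List String) (acc : List String),
    bl.foldl (fun acc block =>
        acc ++ (PySem.Str.split? (PySem.Str.rstrip block) "\n").getD [] ++ [""]) acc
      = acc ++ bl.flatMap (fun b => (PySem.Str.split? (PySem.Str.rstrip b) "\n").getD [] ++ [""]) := by
  intro bl
  induction bl with
  | nil => simp
  | cons b bs ih =>
      intro acc
      simp only [List.foldl_cons, List.flatMap_cons]
      rw [ih]
      simp [List.append_assoc]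

-- effect of B's inner per-block bucket update on one of the four priority keys
theorem pvBuckets_step (q : String)
    (hq : q ∈ (["Critical", "High", "Medium", "Low"] : List String))
    (d : PySem.Dict String (List String)) (block : String) :
    (["Critical", "High", "Medium", "Low"].foldl
        (fun d p =>
          if PySem.Str.isIn ("- **Priority**: " ++ p) block then
            d.modify p [] (fun l => l ++ [block])
          else d) d).getD q []
      = if PySem.Str.isIn ("- **Priority**: " ++ q) block
        then d.getD q [] ++ [block] else d.getD q [] := by
  fin_cases hq <;>
    · simp only [List.foldl_cons, List.foldl_nil]
      split_ifs <;> simp_all [PySem.Dict.getD_modify]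

-- B's bucket for each of the four priorities is A's filtered scan of task_blocks
theorem pvBuckets_getD (q : String)
    (hq : q ∈ (["Critical", "High", "Medium", "Low"] : List String))
    (task_blocks : List String) :
    (pvBuckets task_blocks).getD q []
      = task_blocks.filter (fun b => PySem.Str.isIn ("- **Priority**: " ++ q) b) := by
  have main : ∀ (l : List String) (d : PySem.Dict String (List String)),
      (l.foldl
        (fun d block =>
          ["Critical", "High", "Medium", "Low"].foldl
            (fun d p =>
              if PySem.Str.isIn ("- **Priority**: " ++ p) block then
                d.modify p [] (fun l => l ++ [block])
              else d) d) d).getD q []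
        = d.getD q [] ++ l.filter (fun b => PySem.Str.isIn ("- **Priority**: " ++ q) b) := by
    intro l
    induction l with
    | nil => simp
    | cons b bs ih =>
        intro d
        rw [List.foldl_cons, ih, pvBuckets_step q hq, List.filter_cons]
        split_ifs <;> simp
  rw [pvBuckets, main]
  have hinit : ((["Critical", "High", "Medium", "Low"] : List String).foldl
      (fun d p => d.insert p []) (PySem.Dict.empty : PySem.Dict String (List String))).getD q [] = [] := by
    fin_cases hq <;> decide
  rw [hinit, List.nil_append]

-- A's first-dash break loop returns the head of B's dash-index list
theorem pvFirstLoop_eq (ls : List String) : ∀ (s : Int),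
    pvFirstLoopA (PySem.List.enumerate ls s)
      = (((PySem.List.enumerate ls s).filter (fun p => pvIsDashA p.2)).map (fun p => p.1)).headD (-1) := by
  induction ls with
  | nil => intro s; simp [PySem.List.enumerate_nil, pvFirstLoopA]
  | cons x xs ih =>
      intro s
      rw [PySem.List.enumerate_cons]
      by_cases h : pvIsDashA x <;> simp [pvFirstLoopA, h, ih]

theorem pvFirstLoop_eq' (ls : List String) :
    pvFirstLoopA (PySem.List.enumerate ls 0) = (pvDashIdxs ls).headD (-1) := by
  rw [pvFirstLoop_eq]; rfl

-- structure of the dash-index list: head = s + k with k < length, and the tail is the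
-- dash-index list of the lines after position k
theorem pvDashIdxs_cons (ls : List String) : ∀ (s d0 : Int) (rest : List Int),
    ((PySem.List.enumerate ls s).filter (fun p => pvIsDashA p.2)).map (fun p => p.1) = d0 :: rest →
    ∃ k : Nat, d0 = s + (k : Int) ∧ k < ls.length ∧
      rest = ((PySem.List.enumerate (ls.drop (k + 1)) (d0 + 1)).filter (fun p => pvIsDashA p.2)).map (fun p => p.1) := by
  induction ls with
  | nil => intro s d0 rest h; simp [PySem.List.enumerate_nil] at h
  | cons x xs ih =>
      intro s d0 rest h
      rw [PySem.List.enumerate_cons] at h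
      by_cases hx : pvIsDashA x
      · simp [hx] at h
        exact ⟨0, by omega, by simp, by simp [h.1.symm, h.2]⟩
      · simp [hx] at h
        obtain ⟨k, hk1, hk2, hk3⟩ := ih (s + 1) d0 rest h
        exact ⟨k + 1, by omega, by simp; omega, by simpa using hk3⟩

-- A's second break loop over range(j, len(lines)) is the first-dash search of the lines from j on
theorem pvSecondLoop_eq (lines : List String) : ∀ (j : Nat),
    pvSecondLoopA lines (PySem.List.pyRange (j : Int) (lines.length : Int) 1)
      = pvFirstLoopA (PySem.List.enumerate (lines.drop j) (j : Int)) := by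
  intro j
  induction hind : lines.length - j generalizing j with
  | zero =>
      have hj : lines.length ≤ j := by omega
      rw [PySem.List.pyRange_one_eq_nil (by exact_mod_cast hj), List.drop_of_length_le hj]
      simp [pvSecondLoopA, PySem.List.enumerate_nil, pvFirstLoopA]
  | succ n ih =>
      have hj : j < lines.length := by omega
      rw [PySem.List.pyRange_one_cons (by exact_mod_cast hj)]
      rw [List.drop_eq_getElem_cons hj, PySem.List.enumerate_cons]
      simp only [pvSecondLoopA, pvFirstLoopA, PySem.List.pyGetD_natCast,
        List.getD_eq_getElem?_getD, List.getElem?_eq_getElem hj, Option.getD_some]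
      by_cases h : pvIsDashA lines[j]
      · simp [h]
      · simp only [h]
        have := ih (j + 1) (by omega)
        simpa [Int.natCast_add] using this

-- "---" + "-"*90 is "-"*93
theorem pvDash93 :
    ("---" ++ String.ofList (List.replicate 90 '-')) = String.ofList (List.replicate 93 '-') := by
  decide

-- ===== VERDICT (by name: the statement is the Claim_ definition above) =====
theorem organize_tasks_by_priority_spec : Claim_equal_organize_tasks_by_priority := by
  intro task_blocks original_text _
  show organize_tasks_by_priority task_blocks original_text
      = organize_tasks_by_priority_alt task_blocks original_text
  unfold organize_tasks_by_priority organize_tasks_by_priority_alt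
  simp only []
  set lines := (PySem.Str.split? original_text "\n").getD [] with hlines
  rw [pvFirstLoop_eq']
  -- rewrite the four A-sections and the four B-sections to their flatMap normal forms
  simp only [List.foldl_cons, List.foldl_nil]
  rw [pvSectionLoopA_eq, pvSectionLoopA_eq, pvSectionLoopA_eq, pvSectionLoopA_eq,
    pvEmitLoop_eq, pvEmitLoop_eq, pvEmitLoop_eq, pvEmitLoop_eq,
    pvBuckets_getD "Critical" (by simp), pvBuckets_getD "High" (by simp),
    pvBuckets_getD "Medium" (by simp), pvBuckets_getD "Low" (by simp)]
  -- case analysis on the dash-index list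
  rcases hF : pvDashIdxs lines with _ | ⟨d0, rest⟩
  · -- no dash line at all: first = -1, second = -1
    have h0 : pvSecondLoopA lines (PySem.List.pyRange 0 (lines.length : Int) 1) = -1 := by
      have := pvSecondLoop_eq lines 0
      simp only [Nat.cast_zero, List.drop_zero] at this
      rw [this, pvFirstLoop_eq']
      rw [hF]; rfl
    simp only [List.headD_nil]
    norm_num
    rw [h0]
    norm_num
    rw [pvDash93]
  · obtain ⟨k, hk1, hk2, hk3⟩ := pvDashIdxs_cons lines 0 d0 rest hF
    have hd0 : d0 = (k : Int) := by omega
    have hnn : (0 : Int) ≤ d0 := by omega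
    simp only [List.headD_cons, if_pos (by omega : d0 ≥ 0)]
    -- the second search starts at d0 + 1 = ↑(k + 1)
    have hsec : pvSecondLoopA lines (PySem.List.pyRange (d0 + 1) (lines.length : Int) 1)
        = rest.headD (-1) := by
      have := pvSecondLoop_eq lines (k + 1)
      rw [show ((k + 1 : Nat) : Int) = d0 + 1 by omega] at this
      rw [this, pvFirstLoop_eq, ← hk3]
    rw [hsec]
    rcases hR : rest with _ | ⟨d1, rest2⟩
    · -- exactly one dash line: second = -1
      norm_num
      simp
    · -- at least two dash lines: second = d1 ≥ 0
      subst hR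
      obtain ⟨k2, hk21, _, _⟩ := pvDashIdxs_cons _ _ _ _ hk3.symm
      simp only [List.headD_cons, if_pos (by omega : d1 ≥ 0)]
      simp [List.append_assoc]
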